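-- pv_equiv track=rewrite | github.com/camiloricoe/python-camilo | CodeSignal/Arcade/The Core/101-Swap Diagonals.py | solution
-- ===== SOURCE A (Python) =====
-- def solution(matrix):
--     a,b=[],[]
--     for i in range(len(matrix)):
--         a.append(matrix[i][i])
--         b.append(matrix[i][-1-i])
--     for i in range(len(matrix)):
--         matrix[i][i]=b[i]
--         matrix[i][-1-i]=a[i]
--
--
--     return matrix
-- ===== SOURCE B (Python) =====
-- def solution(matrix):
--     return [
--         [row[len(row) - 1 - i] if j == i
--          else row[i] if j == len(row) - 1 - i
--          else v
--          for j, v in enumerate(row)]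
--         for i, row in enumerate(matrix)
--     ]
-- ===== Notes on version B (the rewrite author's own statement) =====
-- stated objective: alternative
-- what changed: B builds a fresh matrix with a nested comprehension that rewrites each row element-by-element (choosing the mirrored diagonal value at positions i and len(row)-1-i), instead of A's two staged index loops that buffer both diagonals and then mutate the matrix in place.
import Mathlib
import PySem

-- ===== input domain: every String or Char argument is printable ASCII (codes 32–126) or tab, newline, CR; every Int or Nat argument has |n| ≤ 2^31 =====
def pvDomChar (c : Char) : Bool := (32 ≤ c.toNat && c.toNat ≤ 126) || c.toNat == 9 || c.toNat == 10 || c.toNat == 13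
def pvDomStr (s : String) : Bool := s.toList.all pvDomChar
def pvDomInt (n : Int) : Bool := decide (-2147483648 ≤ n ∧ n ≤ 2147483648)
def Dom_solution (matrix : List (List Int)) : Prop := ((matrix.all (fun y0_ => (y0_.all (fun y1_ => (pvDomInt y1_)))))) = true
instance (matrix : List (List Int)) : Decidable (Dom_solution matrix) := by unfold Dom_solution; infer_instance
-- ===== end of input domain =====

-- B rebuilds a fresh matrix with a nested comprehension choosing the mirrored diagonal value per element,
-- instead of A's two staged loops with buffer lists that mutate the matrix in place.
-- A mutates `matrix` in place in Python, B does not; the equivalence proved here is about the return value.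

-- ===== PORT A =====
-- two passes: first collect a = diagonal, b = anti-diagonal, then write them back swapped
def solution (matrix : List (List Int)) : List (List Int) :=
  let n : Int := PySem.List.len matrix
  let ab : List Int × List Int :=
    (PySem.List.pyRange 0 n 1).foldl
      (fun ab i =>
        (ab.1 ++ [PySem.List.pyGetD (PySem.List.pyGetD matrix i []) i 0],
         ab.2 ++ [PySem.List.pyGetD (PySem.List.pyGetD matrix i []) (-1 - i) 0]))
      ([], [])
  (PySem.List.pyRange 0 n 1).foldl
    (fun m i =>
      PySem.List.pySetD m i
        (PySem.List.pySetD
          (PySem.List.pySetD (PySem.List.pyGetD m i []) i (PySem.List.pyGetD ab.2 i 0))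
          (-1 - i) (PySem.List.pyGetD ab.1 i 0)))
    matrix

-- ===== PORT B =====
-- nested comprehension: new row i keeps v at (j, v) except positions i and len(row)-1-i, which get the mirrored value
def solution_alt (matrix : List (List Int)) : List (List Int) :=
  (PySem.List.enumerate matrix 0).map (fun p =>
    (PySem.List.enumerate p.2 0).map (fun q =>
      if q.1 = p.1 then PySem.List.pyGetD p.2 ((p.2.length : Int) - 1 - p.1) 0
      else if q.1 = (p.2.length : Int) - 1 - p.1 then PySem.List.pyGetD p.2 p.1 0
      else q.2))

-- ===== PRECONDITION & SPEC =====
-- Pre_: Python A raises IndexError unless every row i has length > i (needed for matrix[i][i] and matrix[i][-1-i]).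
def Pre_solution (matrix : List (List Int)) : Prop :=
  ∀ p ∈ matrix.zipIdx, p.2 < p.1.length
instance (matrix : List (List Int)) : Decidable (Pre_solution matrix) := by
  unfold Pre_solution; infer_instance
def pvWitness_solution : List (List Int) := [[1, 2], [3, 4]]
def Spec_solution (matrix : List (List Int)) (out : List (List Int)) : Prop := out = solution_alt matrix
instance (matrix : List (List Int)) (out : List (List Int)) : Decidable (Spec_solution matrix out) := by unfold Spec_solution; infer_instance

-- ===== CLAIM (what is proved, stated in full; the proofs are below) =====
def Claim_equal_solution : Prop := ∀ (matrix : List (List Int)), Dom_solution matrix → Pre_solution matrix → Spec_solution matrix (solution matrix)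

-- ===== LEMMAS AND PROOFS =====

-- A's first loop: the pair of appended buffers is a pair of maps over the range.
lemma foldl_pair_append (f g : Int → Int) :
    ∀ (l : List Int) (as bs : List Int),
      l.foldl (fun ab i => (ab.1 ++ [f i], ab.2 ++ [g i])) (as, bs)
        = (as ++ l.map f, bs ++ l.map g) := by
  intro l
  induction l with
  | nil => simp
  | cons x l ih => intro as bs; simp [List.foldl_cons, ih]

-- A's second loop: updating index i from the current row, for i over the range, is a map over enumerate.
lemma foldl_set_enum (h : Int → List Int → List Int) :
    ∀ (post pre : List (List Int)),
      (PySem.List.pyRange (pre.length) ((pre.length : Int) + post.length) 1).foldl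
        (fun m i => PySem.List.pySetD m i (h i (PySem.List.pyGetD m i []))) (pre ++ post)
      = pre ++ (PySem.List.enumerate post (pre.length)).map (fun p => h p.1 p.2) := by
  intro post
  induction post with
  | nil => intro pre; simp [PySem.List.pyRange_one_eq_nil, PySem.List.enumerate_nil]
  | cons x post ih =>
    intro pre
    rw [PySem.List.pyRange_one_cons (by simp)]
    rw [List.foldl_cons]
    have hget : PySem.List.pyGetD (pre ++ x :: post) (pre.length : Int) ([] : List Int) = x := by
      simp [PySem.List.pyGetD_natCast, List.getD]
    have hset : PySem.List.pySetD (pre ++ x :: post) (pre.length : Int) (h pre.length x)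
        = (pre ++ [h (pre.length : Int) x]) ++ post := by
      simp [PySem.List.pySetD_natCast]
    rw [hget, hset]
    have := ih (pre ++ [h (pre.length : Int) x])
    have harith : ((pre ++ [h (pre.length : Int) x]).length : Int) = (pre.length : Int) + 1 := by
      simp
    rw [harith] at this
    have harith2 : (pre.length : Int) + ((x :: post).length : Int)
        = ((pre.length : Int) + 1) + (post.length : Int) := by
      simp; omega
    rw [harith2, this]
    simp [PySem.List.enumerate_cons]

-- per-row: A's double pySetD swap equals B's comprehension rewrite of the row
lemma row_swap (row : List Int) (k : Nat) (hk : k < row.length) :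
    PySem.List.pySetD
        (PySem.List.pySetD row (k : Int) (PySem.List.pyGetD row (-1 - (k : Int)) 0))
        (-1 - (k : Int)) (PySem.List.pyGetD row (k : Int) 0)
      = (PySem.List.enumerate row 0).map (fun q =>
          if q.1 = (k : Int) then PySem.List.pyGetD row ((row.length : Int) - 1 - (k : Int)) 0
          else if q.1 = (row.length : Int) - 1 - (k : Int) then PySem.List.pyGetD row (k : Int) 0
          else q.2) := by
  have hvneg : PySem.List.pyGetD row (-1 - (k : Int)) 0 = row[row.length - 1 - k]'(by omega) := by
    have : (-1 - (k : Int)) = -((k + 1 : Nat) : Int) := by push_cast; ring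
    rw [this, PySem.List.pyGetD_neg_natCast _ _ _ (by omega) (by omega)]
    congr 1; omega
  have hvnn : PySem.List.pyGetD row ((row.length : Int) - 1 - (k : Int)) 0
      = row[row.length - 1 - k]'(by omega) := by
    have : ((row.length : Int) - 1 - (k : Int)) = ((row.length - 1 - k : Nat) : Int) := by
      omega
    rw [this, PySem.List.pyGetD_natCast]
    simp [List.getD, List.getElem?_eq_getElem (by omega : row.length - 1 - k < row.length)]
  have hvk : PySem.List.pyGetD row (k : Int) 0 = row[k] := by
    simp [PySem.List.pyGetD_natCast, List.getD, List.getElem?_eq_getElem hk]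
  have hset1 : PySem.List.pySetD row (k : Int) (row[row.length - 1 - k]'(by omega))
      = row.set k (row[row.length - 1 - k]'(by omega)) := by
    simp [PySem.List.pySetD_natCast]
  have hset2 : PySem.List.pySetD (row.set k (row[row.length - 1 - k]'(by omega)))
        (-1 - (k : Int)) (row[k])
      = (row.set k (row[row.length - 1 - k]'(by omega))).set (row.length - 1 - k) (row[k]) := by
    simp only [PySem.List.pySetD, PySem.List.pySet?, PySem.List.pyIdx?, List.length_set]
    have h1 : ¬ (0 ≤ (-1 - (k : Int))) := by omega
    have h2 : -((row.length : Int)) ≤ -1 - (k : Int) := by omega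
    simp only [if_neg h1, if_pos h2]
    simp only [Option.map_some, Option.getD_some]
    congr 1
    omega
  rw [hvneg, hvk, hset1, hset2]
  apply List.ext_getElem
  · simp [PySem.List.length_enumerate]
  · intro t h1 h2
    have ht : t < row.length := by simpa using h1
    rw [List.getElem_map, PySem.List.getElem_enumerate]
    simp only [zero_add, hvnn]
    rw [List.getElem_set, List.getElem_set]
    have hmk : ((row.length : Int) - 1 - (k : Int)) = ((row.length - 1 - k : Nat) : Int) := by
      omega
    simp only [hmk, Nat.cast_inj]
    split_ifs <;> first
      | rfl
      | omega
      | (congr 1; omega)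

theorem solution_spec : Claim_equal_solution := by
  intro matrix _hdom hpre
  unfold Spec_solution solution solution_alt
  simp only [PySem.List.len_eq]
  rw [foldl_pair_append]
  dsimp only [List.nil_append]
  have key := foldl_set_enum
      (fun i row => PySem.List.pySetD (PySem.List.pySetD row i
          (PySem.List.pyGetD ((PySem.List.pyRange 0 (matrix.length : Int) 1).map
            (fun i => PySem.List.pyGetD (PySem.List.pyGetD matrix i []) (-1 - i) 0)) i 0))
        (-1 - i)
        (PySem.List.pyGetD ((PySem.List.pyRange 0 (matrix.length : Int) 1).map
            (fun i => PySem.List.pyGetD (PySem.List.pyGetD matrix i []) i 0)) i 0))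
      matrix []
  simp only [List.length_nil, Nat.cast_zero, zero_add, List.nil_append] at key
  rw [key]
  apply List.map_congr_left
  intro p hp
  rw [PySem.List.mem_enumerate_iff] at hp
  obtain ⟨k, hk, rfl⟩ := hp
  simp only [zero_add]
  have hg1 : PySem.List.pyGetD
      ((PySem.List.pyRange 0 (matrix.length : Int) 1).map
        (fun i => PySem.List.pyGetD (PySem.List.pyGetD matrix i []) i 0)) (k : Int) 0
      = PySem.List.pyGetD (PySem.List.pyGetD matrix (k : Int) []) (k : Int) 0 :=
    PySem.List.pyGetD_map_pyRange _ _ _ _ hk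
  have hg2 : PySem.List.pyGetD
      ((PySem.List.pyRange 0 (matrix.length : Int) 1).map
        (fun i => PySem.List.pyGetD (PySem.List.pyGetD matrix i []) (-1 - i) 0)) (k : Int) 0
      = PySem.List.pyGetD (PySem.List.pyGetD matrix (k : Int) []) (-1 - (k : Int)) 0 :=
    PySem.List.pyGetD_map_pyRange _ _ _ _ hk
  have hrow : PySem.List.pyGetD matrix (k : Int) ([] : List Int) = matrix[k] := by
    simp [PySem.List.pyGetD_natCast, List.getD, List.getElem?_eq_getElem hk]
  have hklen : k < matrix[k].length := by
    have := hpre (matrix[k], k) (by simp [List.mem_zipIdx_iff_getElem?, List.getElem?_eq_getElem hk])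
    simpa using this
  rw [hg1, hg2, hrow]
  exact row_swap matrix[k] k hklen
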